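-- pv_equiv track=rewrite | github.com/UIC-InDeXLab/FCS | calculateEdgeDist.py | getNodeNeighbors
-- ===== SOURCE A (Python) =====
-- def getNodeNeighbors(nodes, edges):
--     nodeNeighbors = {}
--     for node in range(len(nodes)):
--         nodeNeighbors[node] = []
--         for edge in range(len(edges)):
--             if edges[edge][0] == nodes[node]:
--                 nodeNeighbors[node].append(edge)
--     return nodeNeighbors
-- ===== SOURCE B (Python) =====
-- def getNodeNeighbors(nodes, edges):
--     edgesByStart = {}
--     for e in range(len(edges)):
--         edgesByStart.setdefault(edges[e][0], []).append(e)
--     return {node: list(edgesByStart.get(nodes[node], [])) for node in range(len(nodes))}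
-- ===== Notes on version B (the rewrite author's own statement) =====
-- stated objective: faster
-- what changed: Instead of scanning all edges once per node (nested loops), B makes a single pass over the edges grouping edge indices by their start value in a dict, then maps each node index to its value's precomputed group.
-- outside the precondition, e.g. on getNodeNeighbors([], [[]]): A returns {}, B raises IndexError
import Mathlib
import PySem

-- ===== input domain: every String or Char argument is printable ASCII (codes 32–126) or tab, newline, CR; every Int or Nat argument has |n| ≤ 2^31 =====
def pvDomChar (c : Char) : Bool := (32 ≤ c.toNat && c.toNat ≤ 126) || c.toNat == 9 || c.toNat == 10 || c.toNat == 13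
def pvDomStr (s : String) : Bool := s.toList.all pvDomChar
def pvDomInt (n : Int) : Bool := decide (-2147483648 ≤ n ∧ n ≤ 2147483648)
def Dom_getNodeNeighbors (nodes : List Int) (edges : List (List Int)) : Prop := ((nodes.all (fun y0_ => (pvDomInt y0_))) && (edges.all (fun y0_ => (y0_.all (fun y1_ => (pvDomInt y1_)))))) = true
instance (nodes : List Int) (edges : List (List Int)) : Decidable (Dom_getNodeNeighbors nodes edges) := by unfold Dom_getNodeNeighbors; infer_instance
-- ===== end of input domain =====

-- B groups all edges by their start value in ONE pass over the edges, then maps each node index to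
-- its value's group, instead of A's per-node scan over every edge (O(n+m) vs O(n·m)).

-- ===== PORT A =====
-- edges[edge][0] == nodes[node], ported on Option: for edge/node drawn from the ranges,
-- PySem.List.pyGet? nodes node is always `some`; edges.pyGet? edge |>.bind (pyGet? · 0) is `none` exactly
-- where Python raises IndexError (an empty inner list) — those inputs are excluded by Pre_.
def getNodeNeighbors (nodes : List Int) (edges : List (List Int)) : List (Int × List Int) :=
  ((PySem.List.pyRange 0 nodes.length).foldl
    (fun d node =>
      (PySem.List.pyRange 0 edges.length).foldl
        (fun d edge =>
          if ((PySem.List.pyGet? edges edge).bind (fun ed => PySem.List.pyGet? ed 0)) == PySem.List.pyGet? nodes node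
          then d.modify node [] (· ++ [edge])      -- nodeNeighbors[node].append(edge)
          else d)
        (d.insert node []))                        -- nodeNeighbors[node] = []
    (PySem.Dict.empty : PySem.Dict Int (List Int))).items

-- ===== PORT B =====
-- edgesByStart.setdefault(edges[e][0], []).append(e) is Dict.modify key [] (· ++ [e]);
-- the `none` branch is where Python raises IndexError (empty inner list), excluded by Pre_.
-- The final dict comprehension has the distinct keys 0..len(nodes)-1 in order, so it is this map.
def getNodeNeighbors_alt (nodes : List Int) (edges : List (List Int)) : List (Int × List Int) :=
  let edgesByStart : PySem.Dict Int (List Int) :=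
    (PySem.List.pyRange 0 edges.length).foldl
      (fun d e =>
        match (PySem.List.pyGet? edges e).bind (fun ed => PySem.List.pyGet? ed 0) with
        | some v => d.modify v [] (· ++ [e])
        | none => d)
      PySem.Dict.empty
  (PySem.List.pyRange 0 nodes.length).map
    (fun node =>
      (node, match PySem.List.pyGet? nodes node with
             | some v => edgesByStart.getD v []
             | none => []))

-- ===== PRECONDITION & SPEC =====
-- Pre_ excludes inputs with an empty inner edge list: on them Python A raises IndexError whenever
-- nodes is nonempty, and returns {} when nodes is empty only because the edge loop is never entered,
-- while B (which always scans the edges) raises IndexError there.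
def Pre_getNodeNeighbors (nodes : List Int) (edges : List (List Int)) : Prop :=
  ∀ e ∈ edges, e ≠ []
instance (nodes : List Int) (edges : List (List Int)) : Decidable (Pre_getNodeNeighbors nodes edges) := by unfold Pre_getNodeNeighbors; infer_instance

def pvWitness_getNodeNeighbors : List Int × List (List Int) := ([2, 3, 2], [[2, 3], [3, 2], [2, 2]])

def Spec_getNodeNeighbors (nodes : List Int) (edges : List (List Int)) (out : List (Int × List Int)) : Prop := out = getNodeNeighbors_alt nodes edges
instance (nodes : List Int) (edges : List (List Int)) (out : List (Int × List Int)) : Decidable (Spec_getNodeNeighbors nodes edges out) := by unfold Spec_getNodeNeighbors; infer_instance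

-- ===== CLAIM (what is proved, stated in full; the proofs are below) =====
def Claim_equal_getNodeNeighbors : Prop := ∀ (nodes : List Int) (edges : List (List Int)), Dom_getNodeNeighbors nodes edges → Pre_getNodeNeighbors nodes edges → Spec_getNodeNeighbors nodes edges (getNodeNeighbors nodes edges)

-- ===== LEMMAS AND PROOFS =====

-- A's inner loop: every modify hits the one key `k`, so starting from `d.insert k acc` it just
-- appends the condition's filter of the loop list to `acc`.
theorem foldl_modify_single_key (L : List Int) (c : Int → Bool)
    (d : PySem.Dict Int (List Int)) (k : Int) (acc : List Int) :
    L.foldl (fun d e => if c e then d.modify k [] (· ++ [e]) else d) (d.insert k acc)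
      = d.insert k (acc ++ L.filter c) := by
  induction L generalizing acc with
  | nil => simp
  | cons e L ih =>
    simp only [List.foldl_cons, List.filter_cons]
    by_cases hc : c e
    · simp only [hc, if_true]
      have hstep : (d.insert k acc).modify k [] (· ++ [e]) = d.insert k (acc ++ [e]) := by
        simp [PySem.Dict.modify, PySem.Dict.getD_insert_self, PySem.Dict.insert_insert_self]
      rw [hstep, ih (acc ++ [e])]
      simp
    · simp only [hc, if_false, ih acc, Bool.false_eq_true]

-- B's grouping loop, looked up at a value v: it collects exactly the loop elements whose key is v.
theorem getD_groupFold (key : Int → Option Int) (L : List Int)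
    (d : PySem.Dict Int (List Int)) (v : Int) :
    (L.foldl (fun d e => match key e with
                         | some w => d.modify w [] (· ++ [e])
                         | none => d) d).getD v []
      = d.getD v [] ++ L.filter (fun e => key e == some v) := by
  induction L generalizing d with
  | nil => simp
  | cons e L ih =>
    simp only [List.foldl_cons, List.filter_cons]
    cases hk : key e with
    | none => simp [ih]
    | some w =>
      rw [ih]
      by_cases hv : w = v
      · subst hv
        simp [PySem.Dict.modify, PySem.Dict.getD_insert_self]
      · have : (some w == some v) = false := by simp [hv]
        simp only [PySem.Dict.modify, PySem.Dict.getD_insert, this, Bool.false_eq_true, if_false]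
        rw [if_neg (by omega)]

-- ===== VERDICT (by name: the statement is the Claim_ definition above) =====
theorem getNodeNeighbors_spec : Claim_equal_getNodeNeighbors := by
  intro nodes edges _ _
  unfold Spec_getNodeNeighbors getNodeNeighbors getNodeNeighbors_alt
  simp only [foldl_modify_single_key, List.nil_append]
  rw [PySem.List.pyRange_zero_natCast nodes.length,
      PySem.Dict.items_foldl_insert_fresh _ (fun a => a)
        (fun node => (PySem.List.pyRange 0 edges.length).filter
          (fun edge => ((PySem.List.pyGet? edges edge).bind (fun ed => PySem.List.pyGet? ed 0)) == PySem.List.pyGet? nodes node))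
        PySem.Dict.empty
        (fun a _ => PySem.Dict.contains_empty a)
        (by
          refine List.Nodup.map (fun a b h => h) ?_
          refine List.Nodup.map ?_ List.nodup_range
          intro a b h
          simpa using h)]
  simp only [show (PySem.Dict.empty : PySem.Dict Int (List Int)).items = [] from rfl,
    List.nil_append, List.map_map]
  apply List.map_congr_left
  intro i hi
  have hlt : i < nodes.length := List.mem_range.mp hi
  have hget : PySem.List.pyGet? nodes (i : Int) = some nodes[i] := by
    rw [PySem.List.pyGet?_natCast]; simp [hlt]
  simp only [Function.comp, hget, getD_groupFold]
  simp [PySem.Dict.getD_empty]
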